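-- pv_equiv track=rewrite | github.com/Manitary/advent-of-code | 2016/python/07.py | isTLS
-- ===== SOURCE A (Python) =====
-- def isABBA(s, i):
--     return s[i] == s[i + 3] != s[i + 1] == s[i + 2] and s[i : i + 4].isalpha()
--
-- def isTLS(s):
--     ABBA = False
--     brackets = 0
--     for i in range(len(s) - 3):
--         if s[i] == "[":
--             brackets += 1
--         elif s[i] == "]":
--             brackets -= 1
--         else:
--             if brackets and isABBA(s, i):
--                 return False
--             elif (not ABBA) and isABBA(s, i):
--                 ABBA = True
--     return ABBA
-- ===== SOURCE B (Python) =====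
-- def _has_abba(t):
--     return any(
--         t[i] == t[i + 3] != t[i + 1] == t[i + 2] and t[i : i + 4].isalpha()
--         for i in range(len(t) - 3)
--     )
--
-- def isTLS(s):
--     depth = 0
--     sup = []
--     hyp = []
--     for c in s:
--         if c == "[" or c == "]":
--             sup.append("-")
--             hyp.append("-")
--             depth += 1 if c == "[" else -1
--         else:
--             sup.append(c if depth == 0 else "-")
--             hyp.append(c if depth != 0 else "-")
--     return _has_abba("".join(sup)) and not _has_abba("".join(hyp))
-- ===== Notes on version B (the rewrite author's own statement) =====
-- stated objective: alternative
-- what changed: Instead of A's single interleaved index loop with a live bracket counter and early return, B first partitions the string in one pass into two position-preserving sentinel-masked copies (supernet chars kept at bracket depth 0, hypernet chars at nonzero depth, '-' elsewhere) and then runs two independent ABBA window scans over the masked copies.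
import Mathlib
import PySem

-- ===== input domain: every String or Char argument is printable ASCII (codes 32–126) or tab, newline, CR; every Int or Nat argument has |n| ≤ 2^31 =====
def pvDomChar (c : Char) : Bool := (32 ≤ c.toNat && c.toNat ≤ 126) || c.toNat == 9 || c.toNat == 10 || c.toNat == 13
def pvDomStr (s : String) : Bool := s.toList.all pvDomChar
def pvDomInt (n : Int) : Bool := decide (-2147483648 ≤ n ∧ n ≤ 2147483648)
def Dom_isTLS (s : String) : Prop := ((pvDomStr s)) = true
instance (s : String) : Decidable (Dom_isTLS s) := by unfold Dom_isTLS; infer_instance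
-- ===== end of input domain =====

-- B partitions the string into two sentinel-masked copies (supernet / hypernet) and scans each
-- independently for an ABBA window, instead of A's interleaved single loop with early return.

-- ===== PORT A =====
-- helper isABBA(s, i); every call site has i, i+3 in range, so s[j] is the total pyGetD form
def isABBA (s : List Char) (i : Int) : Bool :=
  (PySem.List.pyGetD s i ' ' == PySem.List.pyGetD s (i + 3) ' ') &&
  (PySem.List.pyGetD s (i + 3) ' ' != PySem.List.pyGetD s (i + 1) ' ') &&
  (PySem.List.pyGetD s (i + 1) ' ' == PySem.List.pyGetD s (i + 2) ' ') &&
  PySem.Chars.strIsalpha (PySem.List.slice s (some i) (some (i + 4)))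

-- the for-loop of A, with its early `return False`
def isTLSLoop (s : List Char) : List Int → Bool → Int → Bool
  | [], ABBA, _ => ABBA
  | i :: rest, ABBA, brackets =>
    if PySem.List.pyGetD s i ' ' == '[' then isTLSLoop s rest ABBA (brackets + 1)
    else if PySem.List.pyGetD s i ' ' == ']' then isTLSLoop s rest ABBA (brackets - 1)
    else if (brackets != 0) && isABBA s i then false
    else if (!ABBA) && isABBA s i then isTLSLoop s rest true brackets
    else isTLSLoop s rest ABBA brackets

def isTLS (s : String) : Bool :=
  isTLSLoop s.toList (PySem.List.pyRange 0 (PySem.Str.len s - 3) 1) false 0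

-- ===== PORT B =====
-- B's helper _has_abba(t): any ABBA window in t (B's own copy of the window test)
def abbaAt (t : List Char) (i : Int) : Bool :=
  (PySem.List.pyGetD t i ' ' == PySem.List.pyGetD t (i + 3) ' ') &&
  (PySem.List.pyGetD t (i + 3) ' ' != PySem.List.pyGetD t (i + 1) ' ') &&
  (PySem.List.pyGetD t (i + 1) ' ' == PySem.List.pyGetD t (i + 2) ' ') &&
  PySem.Chars.strIsalpha (PySem.List.slice t (some i) (some (i + 4)))

def hasAbba (t : List Char) : Bool :=
  (PySem.List.pyRange 0 ((t.length : Int) - 3) 1).any (fun i => abbaAt t i)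

-- one pass over s building the two masked copies (list.append = ++ [·])
def maskStep : Int × List Char × List Char → Char → Int × List Char × List Char
  | (depth, sup, hyp), c =>
    if c == '[' || c == ']' then
      (depth + (if c == '[' then 1 else -1), sup ++ ['-'], hyp ++ ['-'])
    else
      (depth, sup ++ [if depth == 0 then c else '-'], hyp ++ [if depth != 0 then c else '-'])

def isTLS_alt (s : String) : Bool :=
  let r := s.toList.foldl maskStep (0, [], [])
  hasAbba r.2.1 && !hasAbba r.2.2

-- ===== PRECONDITION & SPEC =====
def Spec_isTLS (s : String) (out : Bool) : Prop := out = isTLS_alt s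
instance (s : String) (out : Bool) : Decidable (Spec_isTLS s out) := by unfold Spec_isTLS; infer_instance

-- ===== CLAIM (what is proved, stated in full; the proofs are below) =====
def Claim_equal_isTLS : Prop := ∀ (s : String), Dom_isTLS s → Spec_isTLS s (isTLS s)

-- ===== LEMMAS AND PROOFS =====

-- bracket-depth bookkeeping
def brDelta (c : Char) : Int := if c = '[' then 1 else if c = ']' then -1 else 0

def net (l : List Char) : Int := (l.map brDelta).sum

-- structural forms of the two masked copies produced by B's fold
def maskSup : List Char → Int → List Char
  | [], _ => []
  | c :: cs, d => (if c = '[' ∨ c = ']' then '-' else if d = 0 then c else '-') :: maskSup cs (d + brDelta c)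

def maskHyp : List Char → Int → List Char
  | [], _ => []
  | c :: cs, d => (if c = '[' ∨ c = ']' then '-' else if d ≠ 0 then c else '-') :: maskHyp cs (d + brDelta c)

-- Nat-index window test
def abbaN (t : List Char) (k : Nat) : Bool :=
  (t.getD k ' ' == t.getD (k + 3) ' ') &&
  ((t.getD (k + 3) ' ' != t.getD (k + 1) ' ') &&
  ((t.getD (k + 1) ' ' == t.getD (k + 2) ' ') &&
  (PySem.Chars.isalpha (t.getD k ' ') && (PySem.Chars.isalpha (t.getD (k + 1) ' ') &&
   (PySem.Chars.isalpha (t.getD (k + 2) ' ') && (PySem.Chars.isalpha (t.getD (k + 3) ' ') && true))))))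

def supGood (l : List Char) (j : Nat) : Bool := decide (net (l.take j) = 0) && abbaN l j
def hypGood (l : List Char) (j : Nat) : Bool := decide (net (l.take j) ≠ 0) && abbaN l j

lemma foldl_maskStep : ∀ (l : List Char) (d : Int) (sa sh : List Char),
    l.foldl maskStep (d, sa, sh) = (d + net l, sa ++ maskSup l d, sh ++ maskHyp l d) := by
  intro l
  induction l with
  | nil => intro d sa sh; simp [net, maskSup, maskHyp]
  | cons c cs ih =>
    intro d sa sh
    by_cases h1 : c = '['
    · subst h1
      simp [List.foldl_cons, maskStep, ih, net, maskSup, maskHyp, brDelta, add_assoc]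
    · by_cases h2 : c = ']'
      · subst h2
        simp [List.foldl_cons, maskStep, ih, net, maskSup, maskHyp, brDelta, add_assoc]
      · simp [List.foldl_cons, maskStep, ih, net, maskSup, maskHyp, brDelta, h1, h2]
lemma maskSup_length : ∀ (l : List Char) (d : Int), (maskSup l d).length = l.length := by
  intro l; induction l with
  | nil => intro d; rfl
  | cons c cs ih => intro d; simp [maskSup, ih]
lemma maskHyp_length : ∀ (l : List Char) (d : Int), (maskHyp l d).length = l.length := by
  intro l; induction l with
  | nil => intro d; rfl
  | cons c cs ih => intro d; simp [maskHyp, ih]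
lemma net_take_succ (l : List Char) (k : Nat) (h : k < l.length) :
    net (l.take (k + 1)) = net (l.take k) + brDelta (l.getD k ' ') := by
  have h' : l[k]? = some l[k] := List.getElem?_eq_getElem h
  have h2 : (l.map brDelta)[k]? = some (brDelta l[k]) := by simp [h']
  rw [List.getD_eq_getElem?_getD, h']
  simp only [net, List.map_take, Option.getD_some]
  rw [List.take_add_one, h2]
  simp
lemma maskSup_getD : ∀ (l : List Char) (d : Int) (k : Nat), k < l.length →
    (maskSup l d).getD k ' ' =
      (if l.getD k ' ' = '[' ∨ l.getD k ' ' = ']' then '-'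
       else if d + net (l.take k) = 0 then l.getD k ' ' else '-') := by
  intro l
  induction l with
  | nil => intro d k h; simp at h
  | cons c cs ih =>
    intro d k h
    cases k with
    | zero => simp [maskSup, net]
    | succ k =>
      simp only [maskSup, List.getD_cons_succ, List.take_succ_cons]
      rw [ih _ k (by simpa using h)]
      simp [net, add_assoc]
lemma maskHyp_getD : ∀ (l : List Char) (d : Int) (k : Nat), k < l.length →
    (maskHyp l d).getD k ' ' =
      (if l.getD k ' ' = '[' ∨ l.getD k ' ' = ']' then '-'
       else if d + net (l.take k) ≠ 0 then l.getD k ' ' else '-') := by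
  intro l
  induction l with
  | nil => intro d k h; simp at h
  | cons c cs ih =>
    intro d k h
    cases k with
    | zero => simp [maskHyp, net]
    | succ k =>
      simp only [maskHyp, List.getD_cons_succ, List.take_succ_cons]
      rw [ih _ k (by simpa using h)]
      simp [net, add_assoc]
lemma slice_window (t : List Char) (k : Nat) (h : k + 3 < t.length) :
    PySem.List.slice t (some (k : Int)) (some ((k : Int) + 4)) =
      [t.getD k ' ', t.getD (k+1) ' ', t.getD (k+2) ' ', t.getD (k+3) ' '] := by
  have h4 : ((k : Int) + 4) = ((k + 4 : Nat) : Int) := by push_cast; ring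
  rw [h4, PySem.List.slice_natCast]
  have e : k + 4 - k = 4 := by omega
  rw [e]
  apply List.ext_getElem
  · simp; omega
  · intro i h1 h2
    have hi : i < 4 := by simp at h2; omega
    have e1 : (List.take 4 (List.drop k t))[i] = t[k+i]'(by omega) := by
      simp [List.getElem_take, List.getElem_drop, Nat.add_comm k i]
    rw [e1]
    interval_cases i <;> exact (List.getD_eq_getElem _ ' ' (by omega)).symm

lemma isABBA_natCast (t : List Char) (k : Nat) (h : k + 3 < t.length) :
    isABBA t (k : Int) = abbaN t k := by
  unfold isABBA abbaN
  have e1 : (k : Int) + 1 = ((k + 1 : Nat) : Int) := by push_cast; ring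
  have e2 : (k : Int) + 2 = ((k + 2 : Nat) : Int) := by push_cast; ring
  have e3 : (k : Int) + 3 = ((k + 3 : Nat) : Int) := by push_cast; ring
  rw [slice_window t k h]
  rw [e1, e2, e3]
  simp only [PySem.List.pyGetD_natCast]
  simp [PySem.Chars.strIsalpha, Bool.and_assoc]
lemma abbaN_maskSup (l : List Char) (k : Nat) (h : k + 3 < l.length) :
    abbaN (maskSup l 0) k = supGood l k := by
  have h0 : k < l.length := by omega
  have h1 : k + 1 < l.length := by omega
  have h2 : k + 2 < l.length := by omega
  have g0 := maskSup_getD l 0 k h0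
  have g1 := maskSup_getD l 0 (k+1) h1
  have g2 := maskSup_getD l 0 (k+2) h2
  have g3 := maskSup_getD l 0 (k+3) h
  have n1 := net_take_succ l k h0
  have n2 := net_take_succ l (k+1) h1
  have n3 := net_take_succ l (k+2) h2
  have ha : (PySem.Chars.isalpha '-') = false := by decide
  by_cases b0 : l.getD k ' ' = '[' ∨ l.getD k ' ' = ']'
  · have e0 : PySem.Chars.isalpha (l[k]?.getD ' ') = false := by
      rcases b0 with e | e <;> rw [List.getD_eq_getElem?_getD] at e <;> rw [e] <;> decide
    simp only [abbaN, supGood]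
    rw [g0, if_pos b0]
    simp [ha, e0]
  · have d0 : brDelta (l.getD k ' ') = 0 := by
      push Not at b0; rw [brDelta, if_neg b0.1, if_neg b0.2]
    by_cases b1 : l.getD (k+1) ' ' = '[' ∨ l.getD (k+1) ' ' = ']'
    · have e1 : PySem.Chars.isalpha (l[k + 1]?.getD ' ') = false := by
        rcases b1 with e | e <;> rw [List.getD_eq_getElem?_getD] at e <;> rw [e] <;> decide
      simp only [abbaN, supGood]
      rw [g1, if_pos b1]
      simp [ha, e1]
    · have d1 : brDelta (l.getD (k+1) ' ') = 0 := by
        push Not at b1; rw [brDelta, if_neg b1.1, if_neg b1.2]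
      by_cases b2 : l.getD (k+2) ' ' = '[' ∨ l.getD (k+2) ' ' = ']'
      · have e2 : PySem.Chars.isalpha (l[k + 2]?.getD ' ') = false := by
          rcases b2 with e | e <;> rw [List.getD_eq_getElem?_getD] at e <;> rw [e] <;> decide
        simp only [abbaN, supGood]
        rw [g2, if_pos b2]
        simp [ha, e2]
      · have d2 : brDelta (l.getD (k+2) ' ') = 0 := by
          push Not at b2; rw [brDelta, if_neg b2.1, if_neg b2.2]
        by_cases b3 : l.getD (k+3) ' ' = '[' ∨ l.getD (k+3) ' ' = ']'
        · have e3 : PySem.Chars.isalpha (l[k + 3]?.getD ' ') = false := by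
            rcases b3 with e | e <;> rw [List.getD_eq_getElem?_getD] at e <;> rw [e] <;> decide
          simp only [abbaN, supGood]
          rw [g3, if_pos b3]
          simp [ha, e3]
        · by_cases hz : net (l.take k) = 0
          · simp only [abbaN, supGood]
            rw [g0, g1, g2, g3]
            simp only [List.getD_eq_getElem?_getD] at b0 b1 b2 b3 d0 d1 d2
            simp [b0, b1, b2, b3, n1, n2, n3, d0, d1, d2, hz]
          · simp only [abbaN, supGood]
            rw [g0, if_neg b0]
            simp [hz, ha]
lemma abbaN_maskHyp (l : List Char) (k : Nat) (h : k + 3 < l.length) :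
    abbaN (maskHyp l 0) k = hypGood l k := by
  have h0 : k < l.length := by omega
  have h1 : k + 1 < l.length := by omega
  have h2 : k + 2 < l.length := by omega
  have g0 := maskHyp_getD l 0 k h0
  have g1 := maskHyp_getD l 0 (k+1) h1
  have g2 := maskHyp_getD l 0 (k+2) h2
  have g3 := maskHyp_getD l 0 (k+3) h
  have n1 := net_take_succ l k h0
  have n2 := net_take_succ l (k+1) h1
  have n3 := net_take_succ l (k+2) h2
  have ha : (PySem.Chars.isalpha '-') = false := by decide
  by_cases b0 : l.getD k ' ' = '[' ∨ l.getD k ' ' = ']'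
  · have e0 : PySem.Chars.isalpha (l[k]?.getD ' ') = false := by
      rcases b0 with e | e <;> rw [List.getD_eq_getElem?_getD] at e <;> rw [e] <;> decide
    simp only [abbaN, hypGood]
    rw [g0, if_pos b0]
    simp [ha, e0]
  · have d0 : brDelta (l.getD k ' ') = 0 := by
      push Not at b0; rw [brDelta, if_neg b0.1, if_neg b0.2]
    by_cases b1 : l.getD (k+1) ' ' = '[' ∨ l.getD (k+1) ' ' = ']'
    · have e1 : PySem.Chars.isalpha (l[k + 1]?.getD ' ') = false := by
        rcases b1 with e | e <;> rw [List.getD_eq_getElem?_getD] at e <;> rw [e] <;> decide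
      simp only [abbaN, hypGood]
      rw [g1, if_pos b1]
      simp [ha, e1]
    · have d1 : brDelta (l.getD (k+1) ' ') = 0 := by
        push Not at b1; rw [brDelta, if_neg b1.1, if_neg b1.2]
      by_cases b2 : l.getD (k+2) ' ' = '[' ∨ l.getD (k+2) ' ' = ']'
      · have e2 : PySem.Chars.isalpha (l[k + 2]?.getD ' ') = false := by
          rcases b2 with e | e <;> rw [List.getD_eq_getElem?_getD] at e <;> rw [e] <;> decide
        simp only [abbaN, hypGood]
        rw [g2, if_pos b2]
        simp [ha, e2]
      · have d2 : brDelta (l.getD (k+2) ' ') = 0 := by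
          push Not at b2; rw [brDelta, if_neg b2.1, if_neg b2.2]
        by_cases b3 : l.getD (k+3) ' ' = '[' ∨ l.getD (k+3) ' ' = ']'
        · have e3 : PySem.Chars.isalpha (l[k + 3]?.getD ' ') = false := by
            rcases b3 with e | e <;> rw [List.getD_eq_getElem?_getD] at e <;> rw [e] <;> decide
          simp only [abbaN, hypGood]
          rw [g3, if_pos b3]
          simp [ha, e3]
        · by_cases hz : net (l.take k) = 0
          · simp only [abbaN, hypGood]
            rw [g0, g1, g2, g3]
            simp only [List.getD_eq_getElem?_getD] at b0 b1 b2 b3 d0 d1 d2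
            simp [b0, b1, b2, b3, n1, n2, n3, d0, d1, d2, hz]
          · simp only [abbaN, hypGood]
            rw [g0, g1, g2, g3]
            simp only [List.getD_eq_getElem?_getD] at b0 b1 b2 b3 d0 d1 d2
            simp [b0, b1, b2, b3, n1, n2, n3, d0, d1, d2, hz]
lemma loopA_spec (l : List Char) : ∀ (m k : Nat) (ab : Bool),
    (m = 0 ∨ k + m + 3 ≤ l.length) →
    isTLSLoop l ((List.range' k m).map Int.ofNat) ab (net (l.take k)) =
      (!(List.range' k m).any (hypGood l) && (ab || (List.range' k m).any (supGood l))) := by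
  intro m
  induction m with
  | zero => intro k ab _; simp [isTLSLoop]
  | succ m ih =>
    intro k ab hm
    have hlen : k + m + 4 ≤ l.length := by omega
    have hk : k < l.length := by omega
    have habba : isABBA l (Int.ofNat k) = abbaN l k := isABBA_natCast l k (by omega)
    have hget : PySem.List.pyGetD l (Int.ofNat k) ' ' = l[k]?.getD ' ' := by
      simp [PySem.List.pyGetD_natCast, List.getD_eq_getElem?_getD]
    have ns := net_take_succ l k hk
    rw [List.getD_eq_getElem?_getD] at ns
    have hrec : m = 0 ∨ (k + 1) + m + 3 ≤ l.length := Or.inr (by omega)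
    rw [List.range'_succ]
    simp only [List.map_cons, isTLSLoop, hget, habba, List.any_cons]
    by_cases b0 : l[k]?.getD ' ' = '['
    · have hn : net (l.take (k+1)) = net (l.take k) + 1 := by
        rw [ns, b0]
        have : brDelta '[' = 1 := by decide
        omega
      have hab : abbaN l k = false := by
        have : PySem.Chars.isalpha (l[k]?.getD ' ') = false := by rw [b0]; decide
        simp [abbaN, this]
      rw [if_pos (by simp [b0])]
      rw [← hn, ih (k+1) ab hrec]
      simp [hypGood, supGood, hab]
    · by_cases b1 : l[k]?.getD ' ' = ']'
      · have hn : net (l.take (k+1)) = net (l.take k) - 1 := by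
          rw [ns, b1]
          have : brDelta ']' = -1 := by decide
          omega
        have hab : abbaN l k = false := by
          have : PySem.Chars.isalpha (l[k]?.getD ' ') = false := by rw [b1]; decide
          simp [abbaN, this]
        rw [if_neg (by simp [b0]), if_pos (by simp [b1])]
        rw [show net (l.take k) - 1 = net (l.take (k+1)) by omega, ih (k+1) ab hrec]
        simp [hypGood, supGood, hab]
      · have hn : net (l.take (k+1)) = net (l.take k) := by
          rw [ns]
          simp [brDelta, b0, b1]
        rw [if_neg (by simp [b0]), if_neg (by simp [b1])]
        by_cases hz : net (l.take k) = 0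
        · -- supernet position: the hypernet branch cannot fire
          rw [if_neg (by simp [hz])]
          by_cases hab : abbaN l k = true
          · by_cases hA : ab
            · rw [if_neg (by simp [hA]), ← hn, ih (k+1) ab hrec]
              simp [hypGood, supGood, hz, hab, hA]
            · rw [if_pos (by simp [hA, hab]), ← hn, ih (k+1) true hrec]
              simp [hypGood, supGood, hz, hab, hA]
          · rw [if_neg (by simp [hab]), ← hn, ih (k+1) ab hrec]
            simp [hypGood, supGood, hz, hab]
        · -- hypernet position
          by_cases hab : abbaN l k = true
          · rw [if_pos (by simp [hz, hab])]
            simp [hypGood, hz, hab]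
          · rw [if_neg (by simp [hab]), if_neg (by simp [hab]), ← hn, ih (k+1) ab hrec]
            simp [hypGood, supGood, hab]
lemma hasAbba_sup (l : List Char) :
    hasAbba (maskSup l 0) = (List.range' 0 (l.length - 3)).any (supGood l) := by
  unfold hasAbba
  rw [PySem.List.pyRange_one]
  rw [maskSup_length]
  have e : (((l.length : Int)) - 3 - 0).toNat = l.length - 3 := by omega
  rw [e, List.any_map, ← List.range_eq_range']
  apply PySem.List.any_congr_mem
  intro k hk
  have hk' : k + 3 < l.length := by
    have := List.mem_range.mp hk; omega
  simp only [Function.comp]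
  have : abbaAt (maskSup l 0) ((0 : Int) + (k : Int)) = abbaN (maskSup l 0) k := by
    have : ((0 : Int) + (k : Int)) = ((k : Nat) : Int) := by omega
    rw [this]
    exact isABBA_natCast (maskSup l 0) k (by rw [maskSup_length]; exact hk')
  rw [this, abbaN_maskSup l k hk']
lemma hasAbba_hyp (l : List Char) :
    hasAbba (maskHyp l 0) = (List.range' 0 (l.length - 3)).any (hypGood l) := by
  unfold hasAbba
  rw [PySem.List.pyRange_one]
  rw [maskHyp_length]
  have e : (((l.length : Int)) - 3 - 0).toNat = l.length - 3 := by omega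
  rw [e, List.any_map, ← List.range_eq_range']
  apply PySem.List.any_congr_mem
  intro k hk
  have hk' : k + 3 < l.length := by
    have := List.mem_range.mp hk; omega
  simp only [Function.comp]
  have : abbaAt (maskHyp l 0) ((0 : Int) + (k : Int)) = abbaN (maskHyp l 0) k := by
    have : ((0 : Int) + (k : Int)) = ((k : Nat) : Int) := by omega
    rw [this]
    exact isABBA_natCast (maskHyp l 0) k (by rw [maskHyp_length]; exact hk')
  rw [this, abbaN_maskHyp l k hk']
-- ===== VERDICT (by name: the statement is the Claim_ definition above) =====
theorem isTLS_spec : Claim_equal_isTLS := by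
  unfold Claim_equal_isTLS Spec_isTLS
  intro s _
  unfold isTLS isTLS_alt
  rw [foldl_maskStep]
  simp only [List.nil_append]
  rw [hasAbba_sup, hasAbba_hyp]
  have hl : PySem.Str.len s = (s.toList.length : Int) := by simp [PySem.Str.len_eq]
  rw [hl, PySem.List.pyRange_one]
  have e : (((s.toList.length : Int)) - 3 - 0).toNat = s.toList.length - 3 := by omega
  rw [e, ← List.range_eq_range', List.range_eq_range']
  have e2 : (List.range' 0 (s.toList.length - 3)).map (fun k : Nat => (0 : Int) + (k : Int)) =
      (List.range' 0 (s.toList.length - 3)).map Int.ofNat := by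
    apply List.map_congr_left; intro a _; simp
  rw [e2]
  have h0 : net (s.toList.take 0) = 0 := by simp [net]
  rw [← h0]
  rw [loopA_spec s.toList (s.toList.length - 3) 0 false (by omega)]
  simp [Bool.and_comm]
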